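-- pv_equiv track=rewrite | github.com/sahitikota/TJHSST-Artifical-Intelligence | Rush Hour/RushHour_SahitiKota.py | printPuzzle
-- ===== SOURCE A (Python) =====
-- def printPuzzle(puzzleString):
--     toPrint = ""
--     for index in range (0, len(puzzleString)):
--         if index % 6 != 0:
--             toPrint += puzzleString[index] + " "
--         elif index % 6 == 0:
--             toPrint += '\n'
--             toPrint += puzzleString[index] + " "
--     return toPrint
-- ===== SOURCE B (Python) =====
-- def printPuzzle(puzzleString):
--     rows = ['\n' + ' '.join(puzzleString[i:i+6]) + ' '
--             for i in range(0, len(puzzleString), 6)]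
--     return ''.join(rows)
-- ===== Notes on version B (the rewrite author's own statement) =====
-- stated objective: simpler
-- what changed: Replaces the per-character loop with its index-modulo-6 branching by a single pass over fixed-size six-character chunks, building each row with a join and concatenating the rows.
import Mathlib
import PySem

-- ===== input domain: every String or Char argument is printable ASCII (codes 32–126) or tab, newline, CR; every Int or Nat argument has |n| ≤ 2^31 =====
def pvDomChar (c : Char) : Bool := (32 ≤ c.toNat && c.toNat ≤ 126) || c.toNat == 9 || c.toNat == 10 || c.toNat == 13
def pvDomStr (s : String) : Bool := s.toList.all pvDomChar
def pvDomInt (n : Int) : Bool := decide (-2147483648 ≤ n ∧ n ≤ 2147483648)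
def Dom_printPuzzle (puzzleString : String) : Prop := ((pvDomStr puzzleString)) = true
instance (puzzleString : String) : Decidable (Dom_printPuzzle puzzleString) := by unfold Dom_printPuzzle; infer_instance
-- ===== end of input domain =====

-- B replaces A's per-character loop with index%6 branching by one pass over 6-character chunks (simpler decomposition, same cost).


-- ===== PORT A =====
-- literal transliteration of A: for index in range(0, len(s)): branch on index % 6
def printPuzzle (puzzleString : String) : String :=
  String.ofList <|
    (PySem.List.pyRange 0 (PySem.Str.len puzzleString) 1).foldl
      (fun toPrint index =>
        if PySem.Int.mod index 6 ≠ 0 then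
          toPrint ++ [PySem.List.pyGetD puzzleString.toList index ' ', ' ']
        else if PySem.Int.mod index 6 = 0 then
          (toPrint ++ ['\n']) ++ [PySem.List.pyGetD puzzleString.toList index ' ', ' ']
        else toPrint) []

-- ===== PORT B =====
-- literal transliteration of B: rows over range(0, len, 6), row = '\n' + ' '.join(s[i:i+6]) + ' ', then ''.join(rows)
def printPuzzle_alt (puzzleString : String) : String :=
  String.ofList <|
    PySem.Chars.join []
      ((PySem.List.pyRange 0 (PySem.Str.len puzzleString) 6).map
        (fun i => '\n' ::
          PySem.Chars.join [' ']
            ((PySem.Chars.slice puzzleString.toList (some i) (some (i + 6))).map (fun c => [c]))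
          ++ [' ']))

-- ===== PRECONDITION & SPEC =====
def Spec_printPuzzle (puzzleString : String) (out : String) : Prop := out = printPuzzle_alt puzzleString
instance (puzzleString : String) (out : String) : Decidable (Spec_printPuzzle puzzleString out) := by unfold Spec_printPuzzle; infer_instance

-- ===== CLAIM (what is proved, stated in full; the proofs are below) =====
def Claim_equal_printPuzzle : Prop := ∀ (puzzleString : String), Dom_printPuzzle puzzleString → Spec_printPuzzle puzzleString (printPuzzle puzzleString)

-- ===== LEMMAS AND PROOFS =====

-- the common normal form both programs compute: rows of six, each char followed by ' ', '\n' before each row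
def pvChunkOut (c : List Char) : List Char := c.flatMap (fun ch => [ch, ' '])

def pvSpecList : List Char → List Char
  | [] => []
  | a :: rest => '\n' :: pvChunkOut ((a :: rest).take 6) ++ pvSpecList ((a :: rest).drop 6)
  termination_by l => l.length
  decreasing_by simp

-- A's per-index contribution, Int form (as in the port) and Nat form (for induction)
def pvGInt (l : List Char) (i : Int) : List Char :=
  if PySem.Int.mod i 6 ≠ 0 then [PySem.List.pyGetD l i ' ', ' ']
  else if PySem.Int.mod i 6 = 0 then '\n' :: [PySem.List.pyGetD l i ' ', ' ']
  else []

def pvGA (l : List Char) (k : Nat) : List Char :=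
  if k % 6 ≠ 0 then [l.getD k ' ', ' '] else ['\n', l.getD k ' ', ' ']

theorem pvGA_shift (l : List Char) (k : Nat) :
    pvGA l (6 + k) = pvGA (l.drop 6) k := by
  simp [pvGA, Nat.add_mod_left, List.getD, List.getElem?_drop]

theorem pvChunk_helper (c : List Char) (hne : c ≠ []) (hle : c.length ≤ 6) :
    (List.range c.length).flatMap (pvGA c) = '\n' :: pvChunkOut c := by
  match c with
  | [a] => simp [pvGA, pvChunkOut, List.range_succ]
  | [a,b] => simp [pvGA, pvChunkOut, List.range_succ]
  | [a,b,c] => simp [pvGA, pvChunkOut, List.range_succ]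
  | [a,b,c,d] => simp [pvGA, pvChunkOut, List.range_succ]
  | [a,b,c,d,e] => simp [pvGA, pvChunkOut, List.range_succ]
  | [a,b,c,d,e,f] => simp [pvGA, pvChunkOut, List.range_succ]

theorem pvGA_take (l : List Char) (k : Nat) (hk : k < 6) :
    pvGA (l.take 6) k = pvGA l k := by
  simp [pvGA, List.getD, hk]

theorem pvA_aux : ∀ (n : Nat) (l : List Char), l.length = n →
    (List.range l.length).flatMap (pvGA l) = pvSpecList l := by
  intro n
  induction n using Nat.strong_induction_on with
  | _ n ih =>
    intro l hl
    match l, hl with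
    | [], _ => simp [pvSpecList]
    | a :: rest, hl =>
      rw [pvSpecList]
      set L := a :: rest with hL
      by_cases h6 : L.length ≤ 6
      · have hd : L.drop 6 = [] := List.drop_eq_nil_of_le h6
        have ht : L.take 6 = L := List.take_of_length_le h6
        rw [hd, ht, pvSpecList, pvChunk_helper L (by simp [hL]) h6]
        simp
      · push_neg at h6
        have hsplit : L.length = 6 + (L.length - 6) := by omega
        rw [hsplit, List.range_add, List.flatMap_append, List.flatMap_map]
        have h1 : (List.range 6).flatMap (pvGA L) = '\n' :: pvChunkOut (L.take 6) := by
          have h := pvChunk_helper (L.take 6) (by simp [hL]) (by simp)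
          rw [List.length_take_of_le (by omega)] at h
          rw [← h]
          exact List.flatMap_congr (fun x hx => (pvGA_take L x (List.mem_range.mp hx)).symm)
        have h2 : (List.range (L.length - 6)).flatMap (fun k => pvGA L (6 + k)) =
            pvSpecList (L.drop 6) := by
          have hlen : (L.drop 6).length = L.length - 6 := by simp
          have hc : (List.range (L.length - 6)).flatMap (fun k => pvGA L (6 + k)) =
              (List.range (L.drop 6).length).flatMap (pvGA (L.drop 6)) := by
            rw [hlen]; exact List.flatMap_congr (fun x _ => pvGA_shift L x)
          rw [hc]
          exact ih (L.drop 6).length (by rw [hlen]; omega) _ rfl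
        rw [h1, h2]

theorem pvJoin_empty (ps : List (List Char)) : PySem.Chars.join [] ps = ps.flatten := by
  induction ps with
  | nil => simp [PySem.Chars.join_nil]
  | cons p rest ih =>
    cases rest with
    | nil => simp [PySem.Chars.join_singleton]
    | cons q r => rw [PySem.Chars.join_cons_cons]; simp [ih]

theorem pvRow_eq_chunk (c : List Char) (hne : c ≠ []) :
    PySem.Chars.join [' '] (c.map (fun ch => [ch])) ++ [' '] = pvChunkOut c := by
  induction c with
  | nil => simp at hne
  | cons a rest ih =>
    cases rest with
    | nil => simp [PySem.Chars.join_singleton, pvChunkOut]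
    | cons b r =>
      simp only [List.map_cons] at *
      rw [PySem.Chars.join_cons_cons]
      simp only [List.cons_append, List.nil_append]
      rw [ih (by simp)]
      simp [pvChunkOut]

theorem pvB_range (n : Nat) :
    PySem.List.pyRange 0 (n : Int) 6 =
      (List.range ((n + 5) / 6)).map (fun k => ((6 * k : Nat) : Int)) := by
  rw [PySem.List.pyRange_of_pos 0 (n : Int) (by norm_num)]
  rcases Nat.eq_zero_or_pos n with h | h
  · subst h; simp
  · have hif : (0 : Int) < (n : Int) := by exact_mod_cast h
    rw [if_pos hif]
    have hcnt : (((n : Int) - 0 + 6 - 1) / 6).toNat = (n + 5) / 6 := by omega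
    rw [hcnt]
    apply List.map_congr_left
    intro k _
    push_cast; ring

theorem pvB_natAux : ∀ (n : Nat) (l : List Char), l.length = n →
    ((List.range ((l.length + 5) / 6)).map
      (fun k => '\n' :: pvChunkOut ((l.drop (6 * k)).take 6))).flatten = pvSpecList l := by
  intro n
  induction n using Nat.strong_induction_on with
  | _ n ih =>
    intro l hl
    match l, hl with
    | [], _ => simp [pvSpecList]
    | a :: rest, hl =>
      rw [pvSpecList]
      set L := a :: rest with hL
      have h1 : 1 ≤ L.length := by rw [hL]; simp
      have hm : (L.length + 5) / 6 = ((L.drop 6).length + 5) / 6 + 1 := by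
        simp only [List.length_drop]; omega
      rw [hm, List.range_succ_eq_map, List.map_cons, List.map_map, List.flatten_cons]
      have htail : (List.range (((L.drop 6).length + 5) / 6)).map
            ((fun k => '\n' :: pvChunkOut ((L.drop (6 * k)).take 6)) ∘ Nat.succ) =
          (List.range (((L.drop 6).length + 5) / 6)).map
            (fun k => '\n' :: pvChunkOut (((L.drop 6).drop (6 * k)).take 6)) := by
        apply List.map_congr_left
        intro k _
        have h66 : 6 * (Nat.succ k) = 6 + 6 * k := by omega
        simp only [Function.comp_apply, List.drop_drop, h66]
      have h2 : 1 ≤ n := hl ▸ h1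
      rw [htail, ih (L.drop 6).length (by simp only [List.length_drop, hl]; omega) _ rfl]
      simp

theorem pvGInt_natCast (l : List Char) (k : Nat) : pvGInt l (0 + (k : Int)) = pvGA l k := by
  have hmod : PySem.Int.mod (0 + (k : Int)) 6 = ((k % 6 : Nat) : Int) := by
    rw [PySem.Int.mod_eq_emod_of_pos (by norm_num)]; omega
  simp only [pvGInt, pvGA, hmod, zero_add, PySem.List.pyGetD_natCast, Nat.cast_eq_zero]
  by_cases h : k % 6 = 0
  · have hd : (6 : Int) ∣ (k : Int) := by omega
    simp [h, hd]
  · have hd : ¬ (6 : Int) ∣ (k : Int) := by omega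
    simp [h, hd]

theorem pvA_eq (s : String) : printPuzzle s = String.ofList (pvSpecList s.toList) := by
  unfold printPuzzle
  have hbody : (fun (toPrint : List Char) (index : Int) =>
        if PySem.Int.mod index 6 ≠ 0 then
          toPrint ++ [PySem.List.pyGetD s.toList index ' ', ' ']
        else if PySem.Int.mod index 6 = 0 then
          (toPrint ++ ['\n']) ++ [PySem.List.pyGetD s.toList index ' ', ' ']
        else toPrint) = (fun acc i => acc ++ pvGInt s.toList i) := by
    funext acc i
    simp only [pvGInt]
    split_ifs <;> simp
  rw [hbody, PySem.List.foldl_append_eq_flatMap, PySem.Str.len_eq,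
    PySem.List.pyRange_one, List.flatMap_map]
  have hrng : (((s.toList.length : Int) - 0).toNat) = s.toList.length := by omega
  rw [hrng]
  congr 1
  rw [List.nil_append]
  calc List.flatMap (fun (k : Nat) => pvGInt s.toList (0 + (k : Int))) (List.range s.toList.length)
      = List.flatMap (pvGA s.toList) (List.range s.toList.length) :=
        List.flatMap_congr (fun k _ => pvGInt_natCast s.toList k)
    _ = pvSpecList s.toList := pvA_aux s.toList.length s.toList rfl

theorem pvB_eq (s : String) : printPuzzle_alt s = String.ofList (pvSpecList s.toList) := by
  unfold printPuzzle_alt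
  rw [pvJoin_empty, PySem.Str.len_eq, pvB_range, List.map_map]
  congr 1
  set l := s.toList with hl
  have hmap : (List.range ((l.length + 5) / 6)).map
        ((fun i => '\n' :: PySem.Chars.join [' ']
            ((PySem.Chars.slice l (some i) (some (i + 6))).map (fun c => [c])) ++ [' '])
          ∘ fun k => ((6 * k : Nat) : Int)) =
      (List.range ((l.length + 5) / 6)).map
        (fun k => '\n' :: pvChunkOut ((l.drop (6 * k)).take 6)) := by
    apply List.map_congr_left
    intro k hk
    have hk6 : 6 * k < l.length := by
      have := List.mem_range.mp hk
      omega
    have hslice : PySem.Chars.slice l (some ((6 * k : Nat) : Int))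
        (some (((6 * k : Nat) : Int) + 6)) = (l.drop (6 * k)).take 6 := by
      have hc : (((6 * k : Nat) : Int) + 6) = (((6 * k + 6 : Nat)) : Int) := by push_cast; ring
      rw [PySem.Chars.slice_eq_listSlice, hc, PySem.List.slice_natCast]
      congr 1
      omega
    have hne : (l.drop (6 * k)).take 6 ≠ [] := by
      apply List.ne_nil_of_length_pos
      simp only [List.length_take, List.length_drop]
      omega
    simp only [Function.comp_apply, hslice]
    rw [List.cons_append, pvRow_eq_chunk _ hne]
  rw [hmap]
  exact pvB_natAux l.length l rfl

-- ===== VERDICT (by name: the statement is the Claim_ definition above) =====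
theorem printPuzzle_spec : Claim_equal_printPuzzle := by
  intro s _
  unfold Spec_printPuzzle
  rw [pvA_eq, pvB_eq]
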